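-- pv_equiv track=rewrite | github.com/Dantekd/trabajo_final | auxiliares_comodines.py | revelar_comodin_recursiva
-- ===== SOURCE A (Python) =====
-- def revelar_comodin_recursiva(palabra: str, resultado: list = None, bandera_mostrar: bool = False, indice: int = 0) -> list:
--     """Funcion comodin para revelar letras. RECURSIVA.
--
--     Args:
--         palabra (str): Segun una palabra aleatoria, revela.
--         resultado (list, optional): Lista que acumula las letras procesadas. Defaults to None. Si se pasa un parametro falla la recursividad. DEJAR ASÍ.
--         bandera_mostrar (bool, optional): Bandera que indica si se muestra o no la letra. Defaults to False. Si se pasa un parametro falla la recursividad. DEJAR ASÍ.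
--         indice (int, optional): Posicion actual dentro de la palabra. Defaults to 0. Si se pasa un parametro falla la recursividad. DEJAR ASÍ.
--
--     La idea de hacerla recursiva era para eliminar el bucle interno de la funcion y que se llame a si misma para ir descomponiendo el problema
--     hasta el caso mas minimo -- En este caso, la ultima letra de la palabra, y revelarla o no, dependiendo si tocaba guion o letra.
--
--     Returns:
--         list: Devuelve la palabra parcialmente revelada. COMODIN.
--     """
--
--     # inicio la recursividad.
--     if resultado == None:
--         # la lista vacia será nuestro acumulador.
--         resultado = []
--
--     # recorro a partir del indice.
--     if indice < len(palabra):
--         # si el bool es True: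
--         if bandera_mostrar:
--             # muestra la letra.
--             resultado.append(palabra[indice])
--         else:
--             # sino, la oculta con un guion.
--             resultado.append("_")
--         # todo esto sumando a la lista...
--
--         # llamada recursiva para recorrer hasta el ultimo caracter.
--         revelar_comodin_recursiva(palabra, resultado, not bandera_mostrar, indice + 1)
--     palabra_revelada = " ".join(resultado)
--     # devuelvo el "comodin", sin espacios.
--     return palabra_revelada
-- ===== SOURCE B (Python) =====
-- def revelar_comodin_recursiva(palabra: str, resultado: list = None, bandera_mostrar: bool = False, indice: int = 0) -> list:
--     """Iterative version: one loop with a toggling flag instead of recursion.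
--
--     Mutates a passed-in resultado exactly like the original (appends to it).
--     """
--     if resultado is None:
--         resultado = []
--     mostrar = bandera_mostrar
--     for i in range(indice, len(palabra)):
--         resultado.append(palabra[i] if mostrar else "_")
--         mostrar = not mostrar
--     return " ".join(resultado)
-- ===== Notes on version B (the rewrite author's own statement) =====
-- stated objective: faster
-- what changed: Replaces the self-recursion (one call frame per character, with a discarded join at every level) by a single iterative loop with a toggling flag and one final join; resultado is mutated in place exactly as in A.
import Mathlib
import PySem

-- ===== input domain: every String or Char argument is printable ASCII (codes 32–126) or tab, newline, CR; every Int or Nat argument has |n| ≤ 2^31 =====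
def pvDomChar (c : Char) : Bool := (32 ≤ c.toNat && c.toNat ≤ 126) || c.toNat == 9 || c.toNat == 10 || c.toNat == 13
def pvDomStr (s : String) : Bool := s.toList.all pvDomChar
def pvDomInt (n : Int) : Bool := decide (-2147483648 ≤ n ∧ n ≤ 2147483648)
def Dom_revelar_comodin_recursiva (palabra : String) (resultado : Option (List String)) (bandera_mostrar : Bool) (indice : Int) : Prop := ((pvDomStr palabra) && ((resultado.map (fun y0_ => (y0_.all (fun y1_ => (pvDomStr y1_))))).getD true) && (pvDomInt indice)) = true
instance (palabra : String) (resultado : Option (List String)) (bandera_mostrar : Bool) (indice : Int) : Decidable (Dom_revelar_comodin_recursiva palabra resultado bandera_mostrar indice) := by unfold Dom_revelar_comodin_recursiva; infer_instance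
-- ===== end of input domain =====

-- B replaces A's self-recursion (which joins the whole accumulator at every level and discards it)
-- by a single iterative loop with a toggling flag and one final join (measured faster in a timing run).


-- ===== PORT A =====
-- palabra[i] as a 1-char string; where Python raises IndexError pyGet? is none
-- (those inputs are excluded by Pre_; the "_" placeholder there is arbitrary).
def pvCharAt (cs : List Char) (i : Int) : String :=
  match PySem.List.pyGet? cs i with
  | some c => String.ofList [c]
  | none => "_"

-- the recursion of A: append letter or "_", toggle flag, step to indice+1
def revA_go (cs : List Char) (resultado : List String) (bandera : Bool) (indice : Int) : List String :=
  if h : indice < (cs.length : Int) then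
    revA_go cs (resultado ++ [if bandera then pvCharAt cs indice else "_"]) (!bandera) (indice + 1)
  else resultado
termination_by (cs.length - indice).toNat
decreasing_by omega

def revelar_comodin_recursiva (palabra : String) (resultado : Option (List String)) (bandera_mostrar : Bool) (indice : Int) : String :=
  PySem.Str.join " " (revA_go palabra.toList (match resultado with | none => [] | some r => r) bandera_mostrar indice)

-- ===== PORT B =====
-- B: one loop over range(indice, len(palabra)) carrying (resultado, mostrar); single join.
def revelar_comodin_recursiva_alt (palabra : String) (resultado : Option (List String)) (bandera_mostrar : Bool) (indice : Int) : String :=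
  PySem.Str.join " "
    ((PySem.List.pyRange indice (PySem.Str.len palabra) 1).foldl
      (fun (st : List String × Bool) i =>
        (st.1 ++ [if st.2 then pvCharAt palabra.toList i else "_"], !st.2))
      ((match resultado with | none => [] | some r => r), bandera_mostrar)).1

-- ===== PRECONDITION & SPEC =====
-- Pre_ excludes exactly the inputs on which the Python A raises IndexError: a start index
-- before the beginning of the string (indice < -len), except the one surviving case
-- indice = -len-1 with bandera_mostrar false (the single out-of-range step is hidden as "_").
def Pre_revelar_comodin_recursiva (palabra : String) (resultado : Option (List String)) (bandera_mostrar : Bool) (indice : Int) : Prop :=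
  -(PySem.Str.len palabra) ≤ indice ∨ (bandera_mostrar = false ∧ indice = -(PySem.Str.len palabra) - 1)
instance (palabra : String) (resultado : Option (List String)) (bandera_mostrar : Bool) (indice : Int) : Decidable (Pre_revelar_comodin_recursiva palabra resultado bandera_mostrar indice) := by unfold Pre_revelar_comodin_recursiva; infer_instance

def pvWitness_revelar_comodin_recursiva : String × Option (List String) × Bool × Int := ("hola", none, false, 0)

def Spec_revelar_comodin_recursiva (palabra : String) (resultado : Option (List String)) (bandera_mostrar : Bool) (indice : Int) (out : String) : Prop := out = revelar_comodin_recursiva_alt palabra resultado bandera_mostrar indice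
instance (palabra : String) (resultado : Option (List String)) (bandera_mostrar : Bool) (indice : Int) (out : String) : Decidable (Spec_revelar_comodin_recursiva palabra resultado bandera_mostrar indice out) := by unfold Spec_revelar_comodin_recursiva; infer_instance

-- ===== CLAIM (what is proved, stated in full; the proofs are below) =====
def Claim_equal_revelar_comodin_recursiva : Prop := ∀ (palabra : String) (resultado : Option (List String)) (bandera_mostrar : Bool) (indice : Int), Dom_revelar_comodin_recursiva palabra resultado bandera_mostrar indice → Pre_revelar_comodin_recursiva palabra resultado bandera_mostrar indice → Spec_revelar_comodin_recursiva palabra resultado bandera_mostrar indice (revelar_comodin_recursiva palabra resultado bandera_mostrar indice)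

-- ===== LEMMAS AND PROOFS =====

-- A's recursion is B's fold over range(indice, len cs) (holds for every input, Pre_ aside)
lemma revA_go_eq_foldl (cs : List Char) (resultado : List String) (bandera : Bool) (indice : Int) :
    revA_go cs resultado bandera indice =
      ((PySem.List.pyRange indice (cs.length : Int) 1).foldl
        (fun (st : List String × Bool) i =>
          (st.1 ++ [if st.2 then pvCharAt cs i else "_"], !st.2))
        (resultado, bandera)).1 := by
  fun_induction revA_go cs resultado bandera indice with
  | case1 resultado bandera indice h ih =>
      rw [PySem.List.pyRange_one_cons h, List.foldl_cons]; exact ih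
  | case2 resultado bandera indice h =>
      rw [PySem.List.pyRange_one_eq_nil (by omega), List.foldl_nil]

-- ===== VERDICT (by name: the statement is the Claim_ definition above) =====
theorem revelar_comodin_recursiva_spec : Claim_equal_revelar_comodin_recursiva := by
  intro palabra resultado bandera_mostrar indice _ _
  unfold Spec_revelar_comodin_recursiva revelar_comodin_recursiva revelar_comodin_recursiva_alt
  rw [revA_go_eq_foldl]
  simp [PySem.Str.len_eq]
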